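-- pv_equiv track=rewrite | github.com/whitelightning450/wordle_analyst_ideas | word_matcher.py | wrongpos_check
-- ===== SOURCE A (Python) =====
-- from itertools import chain
--
-- def rightpos_check(guess, answer):
--     return [
--         _i
--         for _i in range(max(len(guess), len(answer)))
--         if ord(guess[_i]) ^ ord(answer[_i]) == 0
--     ]
--
-- def wrongpos_check(guess, answer, rightpos=None):
--     if not rightpos:
--         rightpos = rightpos_check(guess, answer)
--     answer_remain = "".join(l for _i, l in enumerate(answer) if _i not in rightpos)
--     wrongpos = []
--     for _i, _gl in enumerate(guess):
--         if _gl in answer_remain: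
--             answer_remain = answer_remain.replace(_gl, "", 1)
--             wrongpos.append(
--                 [_i for _al in answer if (_gl == _al) and (_i not in rightpos)]
--             )
--     return sorted(list(set(chain(*wrongpos))))
-- ===== SOURCE B (Python) =====
-- def rightpos_check(guess, answer):
--     return [
--         _i
--         for _i in range(max(len(guess), len(answer)))
--         if ord(guess[_i]) ^ ord(answer[_i]) == 0
--     ]
--
-- def wrongpos_check(guess, answer, rightpos=None):
--     if not rightpos:
--         rightpos = rightpos_check(guess, answer)
--     rp = set(rightpos)
--     groups = {}
--     for i, g in enumerate(guess):
--         groups.setdefault(g, []).append(i)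
--     result = []
--     for letter, idxs in groups.items():
--         available = sum(1 for j, a in enumerate(answer) if a == letter and j not in rp)
--         for i in idxs[:available]:
--             if i not in rp:
--                 result.append(i)
--     return sorted(result)
-- ===== Notes on version B (the rewrite author's own statement) =====
-- stated objective: faster
-- what changed: A's single left-to-right pass that mutates a shared answer_remain string (each hit rescans and copies the string via `in`/replace, O(n^2) overall) is replaced by a per-letter decomposition: group the guess indices by letter, compute each letter's available count over the non-green answer positions once, take the first `available` indices of each group and keep those outside rightpos; no string is ever rescanned or copied.
import Mathlib
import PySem

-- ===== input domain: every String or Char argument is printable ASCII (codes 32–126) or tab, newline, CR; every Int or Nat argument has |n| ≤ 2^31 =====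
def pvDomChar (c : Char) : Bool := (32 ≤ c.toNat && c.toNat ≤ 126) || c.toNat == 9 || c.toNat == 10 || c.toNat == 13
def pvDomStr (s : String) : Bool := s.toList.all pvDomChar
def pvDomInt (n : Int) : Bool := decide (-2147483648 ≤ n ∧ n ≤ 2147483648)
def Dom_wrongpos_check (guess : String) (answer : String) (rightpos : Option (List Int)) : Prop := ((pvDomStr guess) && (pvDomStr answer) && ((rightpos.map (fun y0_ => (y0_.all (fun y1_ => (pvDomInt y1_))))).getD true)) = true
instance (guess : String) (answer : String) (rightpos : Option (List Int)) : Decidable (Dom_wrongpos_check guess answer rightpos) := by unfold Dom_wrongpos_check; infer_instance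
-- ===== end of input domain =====

-- B replaces A's single left-to-right pool-consuming pass by a per-letter decomposition
-- (group guess indices by letter, take the first `available` of each group), avoiding the per-hit string rescan/copy; objective: faster (measured).

-- ===== PORT A =====
-- helper rightpos_check: identical source in A and B, shared here.
-- 'ord(guess[_i]) ^ ord(answer[_i]) == 0' is the xor of the code points; out-of-range
-- indexing (Python IndexError) is the 'none' branch, excluded by Pre_.
def pvRightposCheck (guess : String) (answer : String) : List Int :=
  (PySem.List.pyRange 0 (max (PySem.Str.len guess) (PySem.Str.len answer)) 1).filter
    (fun i =>
      match PySem.Str.pyGet? guess i, PySem.Str.pyGet? answer i with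
      | some gc, some ac => (gc.toNat ^^^ ac.toNat) == 0
      | _, _ => false)

-- literal transliteration of A: build answer_remain, one pass over enumerate(guess)
-- consuming the pool ('.replace(_gl, "", 1)' on a string containing _gl = erase first
-- occurrence; '_gl in answer_remain' is single-char substring = membership), then
-- sorted(list(set(chain(*wrongpos)))).
def wrongpos_check (guess : String) (answer : String) (rightpos : Option (List Int)) : List Int :=
  let rp : List Int :=
    match rightpos with
    | none => pvRightposCheck guess answer
    | some l => if l = [] then pvRightposCheck guess answer else l
  let answer_remain : List Char :=
    ((PySem.List.enumerate answer.toList 0).filter (fun p => !(rp.contains p.1))).map (fun p => p.2)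
  let st : List Char × List (List Int) :=
    (PySem.List.enumerate guess.toList 0).foldl
      (fun (st : List Char × List (List Int)) (p : Int × Char) =>
        if st.1.contains p.2 then
          (st.1.erase p.2,
           st.2 ++ [(answer.toList.filter (fun al => p.2 == al && !(rp.contains p.1))).map (fun _ => p.1)])
        else st)
      (answer_remain, [])
  PySem.List.sorted (PySem.Set.ofList st.2.flatten) (fun x => x) false

-- ===== PORT B =====
-- literal transliteration of B: per distinct guess letter, the ascending list of its
-- guess indices, `available` = count of non-green answer positions holding it
-- ('sum(1 for …)' = countP), keep the first `available` indices not in rp, sort the union.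
def wrongpos_check_alt (guess : String) (answer : String) (rightpos : Option (List Int)) : List Int :=
  let rp0 : List Int :=
    match rightpos with
    | none => pvRightposCheck guess answer
    | some l => if l = [] then pvRightposCheck guess answer else l
  let rp : PySem.Set Int := PySem.Set.ofList rp0
  let result : List Int :=
    (PySem.Set.ofList guess.toList).foldl
      (fun acc letter =>
        acc ++
          ((((PySem.List.enumerate guess.toList 0).filter (fun p => p.2 == letter)).map (fun p => p.1)).take
              ((PySem.List.enumerate answer.toList 0).countP
                (fun p => p.2 == letter && !(PySem.Set.contains rp p.1)))).filter
            (fun i => !(PySem.Set.contains rp i)))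
      []
  PySem.List.sorted result (fun x => x) false

-- ===== PRECONDITION & SPEC =====
-- Pre_ excludes exactly the inputs where Python A raises IndexError: rightpos falsy
-- (None or []) together with guess and answer of different lengths (rightpos_check
-- then indexes past the shorter string). B raises there too.
def Pre_wrongpos_check (guess : String) (answer : String) (rightpos : Option (List Int)) : Prop :=
  rightpos.getD [] ≠ [] ∨ guess.toList.length = answer.toList.length
instance (guess : String) (answer : String) (rightpos : Option (List Int)) : Decidable (Pre_wrongpos_check guess answer rightpos) := by unfold Pre_wrongpos_check; infer_instance

def pvWitness_wrongpos_check : String × String × Option (List Int) := ("crane", "caber", none)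

def Spec_wrongpos_check (guess : String) (answer : String) (rightpos : Option (List Int)) (out : List Int) : Prop := out = wrongpos_check_alt guess answer rightpos
instance (guess : String) (answer : String) (rightpos : Option (List Int)) (out : List Int) : Decidable (Spec_wrongpos_check guess answer rightpos out) := by unfold Spec_wrongpos_check; infer_instance

-- ===== CLAIM (what is proved, stated in full; the proofs are below) =====
def Claim_equal_wrongpos_check : Prop := ∀ (guess : String) (answer : String) (rightpos : Option (List Int)), Dom_wrongpos_check guess answer rightpos → Pre_wrongpos_check guess answer rightpos → Spec_wrongpos_check guess answer rightpos (wrongpos_check guess answer rightpos)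

-- ===== LEMMAS AND PROOFS =====

-- the initial pool: the answer letters at non-green positions (A's answer_remain)
def pvRem (ansL : List Char) (rp : List Int) : List Char :=
  ((PySem.List.enumerate ansL 0).filter (fun p => !(rp.contains p.1))).map (fun p => p.2)

-- the lists A's loop appends, in loop order, with the pool threaded through
def pvContribs (ansL : List Char) (rp : List Int) : List Char → Int → List Char → List (List Int)
  | [], _, _ => []
  | c :: t, s, rem =>
    if rem.contains c then
      ((ansL.filter (fun al => c == al && !(rp.contains s))).map (fun _ => s)) ::
        pvContribs ansL rp t (s + 1) (rem.erase c)
    else pvContribs ansL rp t (s + 1) rem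

-- the canonical (already strictly increasing) answer both ports sort to
def pvCanon (g : List Char) (rem : List Char) (rp : List Int) : List Int :=
  ((PySem.List.enumerate g 0).filter
      (fun p => !(rp.contains p.1) && decide ((g.take p.1.toNat).count p.2 < rem.count p.2))).map
    (fun p => p.1)

lemma pv_foldA (ansL : List Char) (rp : List Int) (g : List Char) :
    ∀ (s : Int) (rem : List Char) (wp : List (List Int)),
    ((PySem.List.enumerate g s).foldl
      (fun (st : List Char × List (List Int)) (p : Int × Char) =>
        if st.1.contains p.2 then
          (st.1.erase p.2,
           st.2 ++ [(ansL.filter (fun al => p.2 == al && !(rp.contains p.1))).map (fun _ => p.1)])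
        else st)
      (rem, wp)).2 = wp ++ pvContribs ansL rp g s rem := by
  induction g with
  | nil => intro s rem wp; simp [PySem.List.enumerate_nil, pvContribs]
  | cons c t ih =>
    intro s rem wp
    rw [PySem.List.enumerate_cons, List.foldl_cons]
    by_cases h : rem.contains c
    · rw [if_pos h, ih]
      rw [pvContribs, if_pos h]
      simp
    · rw [if_neg h, ih]
      rw [pvContribs, if_neg h]

lemma pv_cnt_mem (c d : Char) (t rem : List Char) (k : Nat) (hmem : c ∈ rem) :
    (((c :: t).take (k + 1)).count d < rem.count d ↔
      (t.take k).count d < (rem.erase c).count d) := by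
  rw [List.take_succ_cons, List.count_cons, List.count_erase]
  by_cases hc : c = d
  · subst hc
    have h1 : 0 < rem.count c := List.count_pos_iff.2 hmem
    simp only [beq_self_eq_true, if_true]
    omega
  · simp only [beq_eq_false_iff_ne.2 hc, Bool.false_eq_true, if_false]
    omega

lemma pv_cnt_not_mem (c d : Char) (t rem : List Char) (k : Nat) (hmem : c ∉ rem) :
    (((c :: t).take (k + 1)).count d < rem.count d ↔
      (t.take k).count d < rem.count d) := by
  rw [List.take_succ_cons, List.count_cons]
  by_cases hc : c = d
  · subst hc
    have h1 : rem.count c = 0 := List.count_eq_zero.2 hmem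
    simp only [beq_self_eq_true, if_true]
    omega
  · simp only [beq_eq_false_iff_ne.2 hc, Bool.false_eq_true, if_false]
    omega

lemma pv_mem_contribs (ansL : List Char) (rp : List Int) :
    ∀ (g : List Char) (s : Int) (rem : List Char) (i : Int),
    i ∈ (pvContribs ansL rp g s rem).flatten ↔
      ∃ (k : Nat) (_ : k < g.length), i = s + k ∧ rp.contains (s + k) = false ∧
        (g.take k).count g[k] < rem.count g[k] ∧ 0 < ansL.count g[k] := by
  intro g
  induction g with
  | nil => intro s rem i; simp [pvContribs]
  | cons c t ih =>
    intro s rem i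
    by_cases h : rem.contains c
    · rw [pvContribs, if_pos h]
      rw [List.flatten_cons, List.mem_append, ih]
      have hmem : c ∈ rem := by simpa using h
      constructor
      · rintro (hin | ⟨k, hk, rfl, hrp, hcnt, hpos⟩)
        · simp only [List.mem_map, List.mem_filter, Bool.and_eq_true, Bool.not_eq_true',
            decide_eq_true_eq, beq_iff_eq] at hin
          obtain ⟨al, ⟨hal, rfl, hrp⟩, rfl⟩ := hin
          refine ⟨0, by simp, by simp, by simpa using hrp, ?_, ?_⟩
          · simpa [List.count_pos_iff] using hmem
          · simp only [List.getElem_cons_zero]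
            exact List.count_pos_iff.2 hal
        · refine ⟨k + 1, by simp only [List.length_cons]; omega, by push_cast; ring, ?_, ?_, ?_⟩
          · have : s + 1 + (k : Int) = s + ((k : Nat) + 1 : Nat) := by push_cast; ring
            rw [← this]; exact hrp
          · simp only [List.getElem_cons_succ]
            exact (pv_cnt_mem c t[k] t rem k hmem).2 hcnt
          · simpa using hpos
      · rintro ⟨k, hk, rfl, hrp, hcnt, hpos⟩
        cases k with
        | zero =>
          left
          simp only [List.getElem_cons_zero] at hcnt hpos
          simp only [List.mem_map, List.mem_filter, Bool.and_eq_true, Bool.not_eq_true',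
            decide_eq_true_eq, beq_iff_eq]
          exact ⟨c, ⟨List.count_pos_iff.1 hpos, rfl, by simpa using hrp⟩, by simp⟩
        | succ k =>
          right
          refine ⟨k, by simp only [List.length_cons] at hk; omega, by push_cast; ring, ?_, ?_, ?_⟩
          · have : s + 1 + (k : Int) = s + ((k : Nat) + 1 : Nat) := by push_cast; ring
            rw [this]; exact hrp
          · simp only [List.getElem_cons_succ] at hcnt
            exact (pv_cnt_mem c (t[k]'(by simp only [List.length_cons] at hk; omega)) t rem k hmem).1 hcnt
          · simpa using hpos
    · rw [pvContribs, if_neg h]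
      rw [ih]
      have hmem : c ∉ rem := by simpa using h
      constructor
      · rintro ⟨k, hk, rfl, hrp, hcnt, hpos⟩
        refine ⟨k + 1, by simp only [List.length_cons]; omega, by push_cast; ring, ?_, ?_, ?_⟩
        · have : s + 1 + (k : Int) = s + ((k : Nat) + 1 : Nat) := by push_cast; ring
          rw [← this]; exact hrp
        · simp only [List.getElem_cons_succ]
          exact (pv_cnt_not_mem c t[k] t rem k hmem).2 hcnt
        · simpa using hpos
      · rintro ⟨k, hk, rfl, hrp, hcnt, hpos⟩
        cases k with
        | zero =>
          simp only [List.getElem_cons_zero] at hcnt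
          have h1 : rem.count c = 0 := List.count_eq_zero.2 hmem
          omega
        | succ k =>
          refine ⟨k, by simp only [List.length_cons] at hk; omega, by push_cast; ring, ?_, ?_, ?_⟩
          · have : s + 1 + (k : Int) = s + ((k : Nat) + 1 : Nat) := by push_cast; ring
            rw [this]; exact hrp
          · simp only [List.getElem_cons_succ] at hcnt
            exact (pv_cnt_not_mem c (t[k]'(by simp only [List.length_cons] at hk; omega)) t rem k hmem).1 hcnt
          · simpa using hpos


lemma pv_mem_canon (g rem : List Char) (rp : List Int) (i : Int) :
    i ∈ pvCanon g rem rp ↔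
      ∃ (k : Nat) (_ : k < g.length), i = (k : Int) ∧ rp.contains (k : Int) = false ∧
        (g.take k).count g[k] < rem.count g[k] := by
  simp only [pvCanon, List.mem_map, List.mem_filter, PySem.List.mem_enumerate_iff]
  constructor
  · rintro ⟨p, ⟨⟨k, hk, rfl⟩, hcond⟩, rfl⟩
    simp only [zero_add, Bool.and_eq_true, Bool.not_eq_true', decide_eq_true_eq, Int.toNat_natCast] at hcond ⊢
    exact ⟨k, hk, rfl, hcond.1, hcond.2⟩
  · rintro ⟨k, hk, rfl, hrp, hcnt⟩
    refine ⟨((k : Int), g[k]), ⟨⟨k, hk, by simp⟩, ?_⟩, rfl⟩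
    simp only [Bool.and_eq_true, Bool.not_eq_true', decide_eq_true_eq]
    refine ⟨hrp, ?_⟩
    simpa using hcnt


lemma pv_canon_pairwise (g rem : List Char) (rp : List Int) :
    (pvCanon g rem rp).Pairwise (fun a b => a < b) := by
  unfold pvCanon
  rw [List.pairwise_map]
  exact (PySem.List.pairwise_lt_enumerate g 0).filter _


lemma pv_rem_count_le (ansL : List Char) (rp : List Int) (c : Char) :
    (pvRem ansL rp).count c ≤ ansL.count c := by
  have h : (pvRem ansL rp).Sublist (((PySem.List.enumerate ansL 0)).map (fun p => p.2)) :=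
    List.Sublist.map _ (List.filter_sublist)
  rw [PySem.List.map_snd_enumerate] at h
  exact h.count_le c


def pvIdxs (g : List Char) (c : Char) (s : Int) : List Int :=
  ((PySem.List.enumerate g s).filter (fun p => p.2 == c)).map (fun p => p.1)

lemma pv_mem_take_idxs (c : Char) :
    ∀ (t : List Char) (s : Int) (m : Nat) (i : Int),
    i ∈ (pvIdxs t c s).take m ↔
      ∃ (k : Nat) (_ : k < t.length), i = s + k ∧ t[k] = c ∧ (t.take k).count c < m := by
  intro t
  induction t with
  | nil => intro s m i; simp [pvIdxs]
  | cons x t ih =>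
    intro s m i
    rw [pvIdxs, PySem.List.enumerate_cons, List.filter_cons]
    by_cases hx : x = c
    · simp only [hx, beq_self_eq_true, if_true, List.map_cons]
      cases m with
      | zero =>
        simp only [List.take_zero, List.not_mem_nil, false_iff]
        rintro ⟨k, hk, rfl, hkc, hcnt⟩
        omega
      | succ m =>
        rw [List.take_succ_cons, List.mem_cons]
        rw [show ((PySem.List.enumerate t (s + 1)).filter (fun p => p.2 == c)).map (fun p => p.1) =
          pvIdxs t c (s + 1) from rfl, ih]
        constructor
        · rintro (rfl | ⟨k, hk, rfl, hkc, hcnt⟩)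
          · exact ⟨0, by simp, by simp, by simp [hx], by simp⟩
          · refine ⟨k + 1, by simp only [List.length_cons]; omega, by push_cast; ring, by simpa using hkc, ?_⟩
            rw [List.take_succ_cons, List.count_cons]
            simp only [beq_self_eq_true, if_true]
            omega
        · rintro ⟨k, hk, rfl, hkc, hcnt⟩
          cases k with
          | zero => left; simp
          | succ k =>
            right
            refine ⟨k, by simp only [List.length_cons] at hk; omega, by push_cast; ring, by simpa using hkc, ?_⟩
            rw [List.take_succ_cons, List.count_cons] at hcnt
            simp only [beq_self_eq_true, if_true] at hcnt
            omega
    · simp only [beq_eq_false_iff_ne.2 hx, Bool.false_eq_true, if_false]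
      rw [show ((PySem.List.enumerate t (s + 1)).filter (fun p => p.2 == c)).map (fun p => p.1) =
        pvIdxs t c (s + 1) from rfl, ih]
      constructor
      · rintro ⟨k, hk, rfl, hkc, hcnt⟩
        refine ⟨k + 1, by simp only [List.length_cons]; omega, by push_cast; ring, by simpa using hkc, ?_⟩
        rw [List.take_succ_cons, List.count_cons]
        simp only [beq_eq_false_iff_ne.2 hx, Bool.false_eq_true, if_false]
        omega
      · rintro ⟨k, hk, rfl, hkc, hcnt⟩
        cases k with
        | zero => simp only [List.getElem_cons_zero] at hkc; exact absurd hkc hx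
        | succ k =>
          refine ⟨k, by simp only [List.length_cons] at hk; omega, by push_cast; ring, by simpa using hkc, ?_⟩
          rw [List.take_succ_cons, List.count_cons] at hcnt
          simp only [beq_eq_false_iff_ne.2 hx, Bool.false_eq_true, if_false] at hcnt
          omega

lemma pv_avail_eq (ansL : List Char) (rp : List Int) (c : Char) :
    (PySem.List.enumerate ansL 0).countP
        (fun p => p.2 == c && !((PySem.Set.ofList rp).contains p.1)) =
      (pvRem ansL rp).count c := by
  have hb : ∀ i : Int, (PySem.Set.ofList rp).contains i = rp.contains i := by
    intro i
    rw [Bool.eq_iff_iff]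
    rw [PySem.Set.contains_iff]
    rw [PySem.Set.mem_ofList]
    simp
  unfold pvRem
  rw [List.count_eq_countP, List.countP_map, List.countP_filter]
  simp only [hb]
  rfl

lemma pv_canon_nodup (g rem : List Char) (rp : List Int) : (pvCanon g rem rp).Nodup :=
  (pv_canon_pairwise g rem rp).imp (fun h => ne_of_lt h)

lemma pv_A_eq_canon (g ansL : List Char) (rp : List Int) :
    PySem.List.sorted (PySem.Set.ofList (pvContribs ansL rp g 0 (pvRem ansL rp)).flatten)
        (fun x => x) false =
      pvCanon g (pvRem ansL rp) rp := by
  apply PySem.List.sorted_eq_of_perm_of_pairwise_lt _ _ _ ?_ (pv_canon_pairwise g _ rp)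
  rw [List.perm_ext_iff_of_nodup (pv_canon_nodup g _ rp) (PySem.Set.nodup_ofList _)]
  intro i
  rw [pv_mem_canon, PySem.Set.mem_ofList, pv_mem_contribs]
  constructor
  · rintro ⟨k, hk, rfl, hrp, hcnt⟩
    refine ⟨k, hk, by simp, by simpa using hrp, hcnt, ?_⟩
    have := pv_rem_count_le ansL rp g[k]
    omega
  · rintro ⟨k, hk, rfl, hrp, hcnt, _⟩
    exact ⟨k, hk, by simp, by simpa using hrp, hcnt⟩

lemma pv_B_eq_canon (g ansL : List Char) (rp : List Int) :
    PySem.List.sorted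
        ((PySem.Set.ofList g).foldl
          (fun acc letter =>
            acc ++
              ((((PySem.List.enumerate g 0).filter (fun p => p.2 == letter)).map (fun p => p.1)).take
                  ((PySem.List.enumerate ansL 0).countP
                    (fun p => p.2 == letter && !(PySem.Set.contains (PySem.Set.ofList rp) p.1)))).filter
                (fun i => !(PySem.Set.contains (PySem.Set.ofList rp) i)))
          [])
        (fun x => x) false =
      pvCanon g (pvRem ansL rp) rp := by
  rw [PySem.List.foldl_append_eq_flatMap, List.nil_append]
  apply PySem.List.sorted_eq_of_perm_of_pairwise_lt _ _ _ ?_ (pv_canon_pairwise g _ rp)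
  have hb : ∀ i : Int, (PySem.Set.ofList rp).contains i = rp.contains i := by
    intro i
    rw [Bool.eq_iff_iff, PySem.Set.contains_iff, PySem.Set.mem_ofList]
    simp
  have hmemf : ∀ (letter : Char) (i : Int),
      i ∈ ((((PySem.List.enumerate g 0).filter (fun p => p.2 == letter)).map (fun p => p.1)).take
            ((PySem.List.enumerate ansL 0).countP
              (fun p => p.2 == letter && !(PySem.Set.contains (PySem.Set.ofList rp) p.1)))).filter
          (fun i => !(PySem.Set.contains (PySem.Set.ofList rp) i)) ↔
        ∃ (k : Nat) (_ : k < g.length), i = (k : Int) ∧ g[k] = letter ∧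
          rp.contains (k : Int) = false ∧ (g.take k).count letter < (pvRem ansL rp).count letter := by
    intro letter i
    rw [List.mem_filter, pv_avail_eq,
      show (((PySem.List.enumerate g 0).filter (fun p => p.2 == letter)).map (fun p => p.1)) =
        pvIdxs g letter 0 from rfl,
      pv_mem_take_idxs]
    constructor
    · rintro ⟨⟨k, hk, rfl, hkc, hcnt⟩, hrp⟩
      rw [hb] at hrp
      simp only [Bool.not_eq_true'] at hrp
      exact ⟨k, hk, by simp, hkc, by simpa using hrp, hcnt⟩
    · rintro ⟨k, hk, rfl, hkc, hrp, hcnt⟩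
      refine ⟨⟨k, hk, by simp, hkc, hcnt⟩, ?_⟩
      rw [hb]
      simpa using hrp
  have hnodupf : ∀ letter : Char,
      (((((PySem.List.enumerate g 0).filter (fun p => p.2 == letter)).map (fun p => p.1)).take
            ((PySem.List.enumerate ansL 0).countP
              (fun p => p.2 == letter && !(PySem.Set.contains (PySem.Set.ofList rp) p.1)))).filter
          (fun i => !(PySem.Set.contains (PySem.Set.ofList rp) i))).Nodup := by
    intro letter
    have hpw : (((PySem.List.enumerate g 0).filter (fun p => p.2 == letter)).map
        (fun p => p.1)).Pairwise (fun a b : Int => a < b) := by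
      rw [List.pairwise_map]
      exact (PySem.List.pairwise_lt_enumerate g 0).filter _
    exact ((hpw.take.filter _).imp (fun h => ne_of_lt h))
  rw [List.perm_ext_iff_of_nodup (pv_canon_nodup g _ rp) ?nd]
  case nd =>
    rw [List.nodup_flatMap]
    refine ⟨fun letter _ => hnodupf letter, ?_⟩
    refine List.Pairwise.imp ?_ ((PySem.Set.nodup_ofList g))
    intro a b hab i hia hib
    rw [hmemf] at hia hib
    obtain ⟨k, hk, rfl, hka, -, -⟩ := hia
    obtain ⟨k', hk', hkk', hkb, -, -⟩ := hib
    have hkeq : k = k' := by omega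
    subst hkeq
    exact hab (hka ▸ hkb ▸ rfl)
  intro i
  rw [pv_mem_canon, List.mem_flatMap]
  constructor
  · rintro ⟨k, hk, rfl, hrp, hcnt⟩
    exact ⟨g[k], (PySem.Set.mem_ofList g g[k]).2 (List.getElem_mem hk),
      (hmemf g[k] _).2 ⟨k, hk, rfl, rfl, hrp, hcnt⟩⟩
  · rintro ⟨letter, -, hif⟩
    obtain ⟨k, hk, rfl, rfl, hrp, hcnt⟩ := (hmemf _ _).1 hif
    exact ⟨k, hk, rfl, hrp, hcnt⟩

-- ===== VERDICT (by name: the statement is the Claim_ definition above) =====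
theorem wrongpos_check_spec : Claim_equal_wrongpos_check := by
  intro guess answer rightpos _ _
  unfold Spec_wrongpos_check wrongpos_check wrongpos_check_alt
  generalize (match rightpos with
    | none => pvRightposCheck guess answer
    | some l => if l = [] then pvRightposCheck guess answer else l) = rp
  dsimp only
  rw [pv_foldA, List.nil_append]
  rw [show ((PySem.List.enumerate answer.toList 0).filter (fun p => !(rp.contains p.1))).map
        (fun p => p.2) = pvRem answer.toList rp from rfl]
  rw [pv_A_eq_canon, pv_B_eq_canon]
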